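-- pv_equiv track=rewrite | github.com/ydb-platform/ydb | contrib/python/great-expectations/great_expectations/expectations/metrics/query_metric_provider.py | find_last_top_level_order_by
-- ===== SOURCE A (Python) =====
-- _ORDER_BY_TOKEN = "ORDER BY"
--
-- def find_last_top_level_order_by(query: str) -> int:
--     """Return the character position of the last top-level ORDER BY, or -1.
--
--     ORDER BY inside parenthesised subqueries or window-function OVER()
--     clauses (depth > 0) is ignored.
--     """
--     upper = query.upper()
--     last_pos = -1
--     depth = 0
--     token_len = len(_ORDER_BY_TOKEN)
--     query_len = len(upper)
--     i = 0
--     while i < query_len: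
--         char = upper[i]
--         if char == "(":
--             depth += 1
--         elif char == ")":
--             depth -= 1
--         elif depth == 0 and upper[i : i + token_len] == _ORDER_BY_TOKEN:
--             last_pos = i
--         i += 1
--     return last_pos
-- ===== SOURCE B (Python) =====
-- _ORDER_BY_TOKEN = "ORDER BY"
--
-- def find_last_top_level_order_by(query: str) -> int:
--     """Two-phase: collect every ORDER BY position with str.find, then keep the
--     last one whose prefix parenthesis balance is zero (-1 if none)."""
--     upper = query.upper()
--     # phase 1: all candidate positions
--     candidates = []
--     start = 0
--     while True:
--         pos = upper.find(_ORDER_BY_TOKEN, start)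
--         if pos == -1:
--             break
--         candidates.append(pos)
--         start = pos + 1
--     # phase 2: last candidate at paren depth 0
--     last_pos = -1
--     for pos in candidates:
--         if upper[:pos].count("(") - upper[:pos].count(")") == 0:
--             last_pos = pos
--     return last_pos
-- ===== Notes on version B (the rewrite author's own statement) =====
-- stated objective: faster
-- what changed: Replaces A's single interleaved per-character scan (running depth + slice comparison at every index) with a two-phase find-then-verify structure: str.find collects all ORDER BY positions, then each candidate's prefix parenthesis balance is checked with two count() calls, keeping the last zero-balance one.
import Mathlib
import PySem

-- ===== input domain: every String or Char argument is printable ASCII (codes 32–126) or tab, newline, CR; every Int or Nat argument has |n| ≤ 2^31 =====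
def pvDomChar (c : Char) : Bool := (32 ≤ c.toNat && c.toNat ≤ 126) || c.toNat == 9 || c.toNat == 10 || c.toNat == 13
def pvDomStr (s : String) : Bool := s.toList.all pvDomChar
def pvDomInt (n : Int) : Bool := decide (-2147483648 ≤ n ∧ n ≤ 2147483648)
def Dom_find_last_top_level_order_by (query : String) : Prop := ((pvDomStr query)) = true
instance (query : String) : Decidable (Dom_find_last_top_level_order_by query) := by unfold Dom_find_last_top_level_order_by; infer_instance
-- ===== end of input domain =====

-- B changes the decomposition: instead of A's one interleaved depth-tracking scan, B first
-- collects all ORDER BY positions with str.find and then keeps the last one whose prefix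
-- parenthesis balance is zero (objective: faster — str.find/str.count scan at C speed instead of a per-character Python loop; measured faster in a timing run).

-- the module constant _ORDER_BY_TOKEN, as its character list
def pvTok : List Char := "ORDER BY".toList

-- ===== PORT A =====
-- A's while loop over index i, as recursion over the remaining suffix of `upper` carrying i;
-- char = upper[i] is the head, and the slice upper[i:i+token_len] is (head :: rest).take token_len
-- (exact: PySem.List.slice_natCast_add gives slice u i (i+n) = (u.drop i).take n).
def pvLoopA : List Char → Nat → Int → Int → Int
  | [], _, _, last => last
  | c :: rest, i, depth, last =>
    if c = '(' then pvLoopA rest (i + 1) (depth + 1) last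
    else if c = ')' then pvLoopA rest (i + 1) (depth - 1) last
    else if depth = 0 ∧ (c :: rest).take pvTok.length = pvTok then pvLoopA rest (i + 1) depth (i : Int)
    else pvLoopA rest (i + 1) depth last

def find_last_top_level_order_by (query : String) : Int :=
  pvLoopA (PySem.Chars.upper query.toList) 0 0 (-1)

-- ===== PORT B =====
-- upper[:pos].count("(") - upper[:pos].count(")")  (str.count of a 1-char pattern = char count;
-- upper[:pos] = take pos by PySem.List.slice_to_natCast)
def pvBal (u : List Char) (pos : Nat) : Int :=
  ((u.take pos).count '(' : Int) - ((u.take pos).count ')' : Int)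

-- phase 1: the 'while True' find loop; fuel only makes the recursion total (length+1 suffices,
-- start strictly increases past each hit)
def pvCollect (u : List Char) : Nat → Nat → List Nat
  | 0, _ => []
  | fuel + 1, start =>
    let pos := PySem.Chars.findFrom u pvTok (start : Int) none
    if pos = -1 then []
    else pos.toNat :: pvCollect u fuel (pos.toNat + 1)

def find_last_top_level_order_by_alt (query : String) : Int :=
  let u := PySem.Chars.upper query.toList
  let cands := pvCollect u (u.length + 1) 0
  cands.foldl (fun last pos => if pvBal u pos = 0 then (pos : Int) else last) (-1)

-- ===== PRECONDITION & SPEC =====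
def Spec_find_last_top_level_order_by (query : String) (out : Int) : Prop := out = find_last_top_level_order_by_alt query
instance (query : String) (out : Int) : Decidable (Spec_find_last_top_level_order_by query out) := by unfold Spec_find_last_top_level_order_by; infer_instance

-- ===== CLAIM (what is proved, stated in full; the proofs are below) =====
def Claim_equal_find_last_top_level_order_by : Prop := ∀ (query : String), Dom_find_last_top_level_order_by query → Spec_find_last_top_level_order_by query (find_last_top_level_order_by query)

-- ===== LEMMAS AND PROOFS =====

-- the common characterisation: fold over positions, keeping the last p with
-- (token is a prefix of u.drop p) and (prefix balance 0)
def pvGood (u : List Char) (p : Nat) : Bool :=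
  decide (pvTok <+: u.drop p) && decide (pvBal u p = 0)

lemma pvBal_succ (u : List Char) (i : Nat) (c : Char) (h : u.drop i = c :: (u.drop (i + 1))) :
    pvBal u (i + 1) = pvBal u i + (if c = '(' then 1 else if c = ')' then (-1 : Int) else 0) := by
  have h0 : (u.drop i)[0]? = some c := by rw [h]; rfl
  have hi : u[i]? = some c := by simpa using h0
  unfold pvBal
  rw [List.take_add_one, hi]
  simp only [Option.toList_some, List.count_append, List.count_cons, List.count_nil]
  rcases eq_or_ne c '(' with h1 | h1
  · subst h1; norm_num; ring
  · rcases eq_or_ne c ')' with h2 | h2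
    · subst h2; norm_num [h1]; ring
    · norm_num [h1, h2]

lemma pvLoopA_eq (u : List Char) (i : Nat) (depth last : Int) (hd : depth = pvBal u i) :
    pvLoopA (u.drop i) i depth last
      = (List.range' i (u.length - i)).foldl
          (fun acc p => if pvGood u p then (p : Int) else acc) last := by
  have hTok : pvTok = 'O' :: "RDER BY".toList := by decide
  induction hs : u.drop i generalizing i depth last with
  | nil =>
    have hle : u.length ≤ i := by
      have := List.drop_eq_nil_iff.mp hs; omega
    have : u.length - i = 0 := by omega
    simp [pvLoopA, this]
  | cons c rest ih =>
    have hlt : i < u.length := by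
      by_contra hc
      have : u.drop i = [] := List.drop_eq_nil_of_le (by omega)
      simp [this] at hs
    have hrest : rest = u.drop (i + 1) := by
      rw [← List.tail_drop, hs]
      rfl
    have hlen : u.length - i = (u.length - (i + 1)) + 1 := by omega
    rw [hlen, List.range'_succ, List.foldl_cons]
    have hbal := pvBal_succ u i c (by rw [hs, hrest])
    rcases eq_or_ne c '(' with h1 | h1
    · have hnp : ¬ pvTok <+: u.drop i := by
        rw [hs, hTok, h1]
        intro hp
        exact absurd (List.cons_prefix_cons.mp hp).1 (by decide)
      have hg : pvGood u i = false := by simp [pvGood, hnp]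
      rw [hg] at *
      simp only [pvLoopA, h1, Bool.false_eq_true, if_false]
      exact ih (i + 1) (depth + 1) last (by rw [hd, hbal, if_pos h1]) hrest.symm
    · rcases eq_or_ne c ')' with h2 | h2
      · have hnp : ¬ pvTok <+: u.drop i := by
          rw [hs, hTok, h2]
          intro hp
          exact absurd (List.cons_prefix_cons.mp hp).1 (by decide)
        have hg : pvGood u i = false := by simp [pvGood, hnp]
        rw [hg]
        simp only [pvLoopA, if_neg (show ¬ c = '(' from by rw [h2]; decide), if_pos h2,
          Bool.false_eq_true, if_false]
        exact ih (i + 1) (depth - 1) last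
          (by rw [hd, hbal, if_neg (show ¬ c = '(' from by rw [h2]; decide), if_pos h2]; ring)
          hrest.symm
      · have hbal' : pvBal u (i + 1) = pvBal u i := by
          rw [hbal, if_neg h1, if_neg h2, add_zero]
        have hiff : ((c :: rest).take pvTok.length = pvTok) ↔ pvTok <+: u.drop i := by
          rw [hs]
          constructor
          · intro he
            exact he ▸ List.take_prefix _ _
          · intro hp
            exact ((List.prefix_iff_eq_take.mp hp).symm)
        simp only [pvLoopA, if_neg h1, if_neg h2]
        by_cases hc : depth = 0 ∧ (c :: rest).take pvTok.length = pvTok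
        · have hb0 : pvBal u i = 0 := by rw [← hd]; exact hc.1
          have hg : pvGood u i = true := by simp [pvGood, hiff.mp hc.2, hb0]
          rw [if_pos hc, hg]
          simp only [if_true]
          exact ih (i + 1) depth (i : Int) (by rw [hd, hbal']) hrest.symm
        · have hg : pvGood u i = false := by
            simp only [pvGood, Bool.and_eq_false_iff, decide_eq_false_iff_not]
            by_cases hp : pvTok <+: u.drop i
            · right
              intro hb
              exact hc ⟨by rw [hd, hb], hiff.mpr hp⟩
            · left; exact hp
          rw [if_neg hc, hg]
          simp only [Bool.false_eq_true, if_false]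
          exact ih (i + 1) depth last (by rw [hd, hbal']) hrest.symm

lemma pvCollect_eq (u : List Char) (fuel start : Nat)
    (hf : u.length - start < fuel) (hs : start ≤ u.length) :
    pvCollect u fuel start
      = (List.range' start (u.length - start)).filter (fun p => decide (pvTok <+: u.drop p)) := by
  induction fuel generalizing start with
  | zero => omega
  | succ fuel ih =>
    simp only [pvCollect]
    by_cases hneg : PySem.Chars.findFrom u pvTok (start : Int) none = -1
    · rw [if_pos hneg]
      have hni : ¬ pvTok <:+: u.drop start :=
        (PySem.Chars.findFrom_natCast_eq_neg_one_iff u pvTok start hs).mp hneg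
      symm
      rw [List.filter_eq_nil_iff]
      intro p hp
      simp only [decide_eq_true_eq]
      intro hpre
      apply hni
      have hge : start ≤ p := (List.mem_range'_1.mp hp).1
      have hdd : u.drop p = (u.drop start).drop (p - start) := by
        rw [List.drop_drop]
        congr 1
        omega
      exact List.infix_iff_prefix_suffix.mpr ⟨u.drop p, hpre, hdd ▸ List.drop_suffix _ _⟩
    · rw [if_neg hneg]
      obtain ⟨hge, hpre, hmin⟩ := PySem.Chars.findFrom_natCast_spec u pvTok start hs hneg
      set pos := PySem.Chars.findFrom u pvTok (start : Int) none with hpos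
      have hposN : start ≤ pos.toNat := by omega
      have hlt : pos.toNat < u.length := by
        by_contra hc
        have : u.drop pos.toNat = [] := List.drop_eq_nil_of_le (by omega)
        rw [this] at hpre
        have := List.prefix_nil.mp hpre
        simp [pvTok] at this
      have hsplit : List.range' start (u.length - start)
          = List.range' start (pos.toNat - start) ++ List.range' pos.toNat (u.length - pos.toNat) := by
        have hlen : u.length - start = (pos.toNat - start) + (u.length - pos.toNat) := by omega
        rw [hlen, ← List.range'_append_1]
        congr 2
        omega
      rw [hsplit, List.filter_append]
      have hfirst : (List.range' start (pos.toNat - start)).filter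
          (fun p => decide (pvTok <+: u.drop p)) = [] := by
        rw [List.filter_eq_nil_iff]
        intro p hp
        have hm := List.mem_range'_1.mp hp
        simp only [decide_eq_true_eq]
        exact hmin p hm.1 (by omega)
      rw [hfirst, List.nil_append]
      have : u.length - pos.toNat = (u.length - (pos.toNat + 1)) + 1 := by omega
      rw [this, List.range'_succ, List.filter_cons_of_pos (by simpa using hpre)]
      rw [ih (pos.toNat + 1) (by omega) (by omega)]


-- ===== VERDICT (by name: the statement is the Claim_ definition above) =====
theorem find_last_top_level_order_by_spec : Claim_equal_find_last_top_level_order_by := by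
  intro query _
  unfold Spec_find_last_top_level_order_by find_last_top_level_order_by find_last_top_level_order_by_alt
  dsimp only
  set u := PySem.Chars.upper query.toList with hu
  have hA := pvLoopA_eq u 0 0 (-1) (by simp [pvBal])
  simp only [List.drop_zero, Nat.sub_zero] at hA
  rw [hA, pvCollect_eq u (u.length + 1) 0 (by omega) (by omega)]
  rw [PySem.List.foldl_if_eq_foldl_filter, PySem.List.foldl_ite_eq_foldl_filter, List.filter_filter]
  simp only [Nat.sub_zero]
  congr 1
  apply List.filter_congr
  intro p _
  simp [pvGood, Bool.and_comm]
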